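-- pv_equiv track=rewrite | github.com/LouisTyndall/BCC | ANPR/ANPRsumbirmingham.py | typejoin
-- ===== SOURCE A (Python) =====
-- def typejoin(x):
-- 	car=['NHSV', 'NOT LICENSED',  'DISABLED PASSENGER VEHICLE',  'ELECTRIC',  'PETROL CAR', 'POLICE', 'HACKNEY', 'ALTERNATIVE FUEL CAR',  'MOWING MACHINE', 'DIESEL CAR', 'DISABLED', 'PERSONAL EXPORT PRIVATE', 'STEAM', 'EXEMPT (SEC 7(1) VE ACT)',  'EXEMPT (NIL LICENCE)', 'DIRECT EXPORT PRIVATE', 'EXEMPT (NO LICENCE)', 'SPECIAL VEHICLE',  'HISTORIC VEHICLE', 'SPECIAL TYPES VEHICLES', 'ROAD CONSTRUCTION', 'RECOVERY VEHICLE', 'SMALL ISLANDS', 'N/A', 'LIMITED USE']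
-- 	motorbike=['BICYCLE','TRICYCLE','ELECTRIC MOTORCYCLE']
-- 	LGV=['AMBULANCE','LIGHT GOODS VEHICLE LGV','LIGHT GOODS FARMERS', 'PRIVATE LIGHT GOODS (PLG)','WORKS TRUCK','GOODS ELECTRIC','EURO 4 LGV',]
-- 	HGV=['TRAILER HGV' 'PRIVATE HGV', 'GRITTING MACHINE','LIFEBOAT HAULAGE', 'ROAD ROLLER','SNOW PLOUGH', 'HGV CT',  'HGV', 'GENERAL HAULAGE','FIRE SERVICE', 'AGRICULTURAL MACHINE','DIGGING MACHINE',  'FIRE ENGINE']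
-- 	Bus=['BUS']
-- 	ret=[]
-- 	for n in x:
-- 		if n[2] in car:
-- 			ret.append([n[0],n[1],'Car',n[3]])
-- 		if n[2] in motorbike:
-- 			ret.append([n[0],n[1],'Mbike',n[3]])
-- 		if n[2] in LGV:
-- 			ret.append([n[0],n[1],'LGV',n[3]])
-- 		if n[2] in HGV:
-- 			ret.append([n[0],n[1],'HGV',n[3]])
-- 		if n[2] in Bus:
-- 			ret.append([n[0],n[1],'Bus',n[3]])
-- 	return ret
-- ===== SOURCE B (Python) =====
-- def typejoin(x):
-- 	car=['NHSV', 'NOT LICENSED',  'DISABLED PASSENGER VEHICLE',  'ELECTRIC',  'PETROL CAR', 'POLICE', 'HACKNEY', 'ALTERNATIVE FUEL CAR',  'MOWING MACHINE', 'DIESEL CAR', 'DISABLED', 'PERSONAL EXPORT PRIVATE', 'STEAM', 'EXEMPT (SEC 7(1) VE ACT)',  'EXEMPT (NIL LICENCE)', 'DIRECT EXPORT PRIVATE', 'EXEMPT (NO LICENCE)', 'SPECIAL VEHICLE',  'HISTORIC VEHICLE', 'SPECIAL TYPES VEHICLES', 'ROAD CONSTRUCTION', 'RECOVERY VEHICLE',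 'SMALL ISLANDS', 'N/A', 'LIMITED USE']
-- 	motorbike=['BICYCLE','TRICYCLE','ELECTRIC MOTORCYCLE']
-- 	LGV=['AMBULANCE','LIGHT GOODS VEHICLE LGV','LIGHT GOODS FARMERS', 'PRIVATE LIGHT GOODS (PLG)','WORKS TRUCK','GOODS ELECTRIC','EURO 4 LGV',]
-- 	HGV=['TRAILER HGV' 'PRIVATE HGV', 'GRITTING MACHINE','LIFEBOAT HAULAGE', 'ROAD ROLLER','SNOW PLOUGH', 'HGV CT',  'HGV', 'GENERAL HAULAGE','FIRE SERVICE', 'AGRICULTURAL MACHINE','DIGGING MACHINE',  'FIRE ENGINE']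
-- 	Bus=['BUS']
-- 	# flatten to (type, label) pairs and sort once by type string; per row a
-- 	# binary search (hand-written bisect_left: A imports nothing, so no bisect
-- 	# module) over the sorted keys finds the label, instead of five per-row
-- 	# membership scans.
-- 	pairs = sorted([(t, 'Car') for t in car] + [(t, 'Mbike') for t in motorbike]
-- 	               + [(t, 'LGV') for t in LGV] + [(t, 'HGV') for t in HGV]
-- 	               + [(t, 'Bus') for t in Bus], key=lambda p: p[0])
-- 	keys = [p[0] for p in pairs]
-- 	def lookup(t):
-- 		lo, hi = 0, len(keys)
-- 		while lo < hi:
-- 			mid = (lo + hi) // 2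
-- 			if keys[mid] < t:
-- 				lo = mid + 1
-- 			else:
-- 				hi = mid
-- 		if lo < len(keys) and keys[lo] == t:
-- 			return pairs[lo][1]
-- 		return None
-- 	ret = []
-- 	for n in x:
-- 		lab = lookup(n[2])
-- 		if lab is not None:
-- 			ret.append([n[0], n[1], lab, n[3]])
-- 	return ret
-- ===== Notes on version B (the rewrite author's own statement) =====
-- stated objective: alternative
-- what changed: B flattens the five category lists into (type,label) pairs sorted once by type string and classifies each row with a hand-written binary search (bisect_left) over the sorted keys instead of A's five linear membership scans per row.
import Mathlib
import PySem

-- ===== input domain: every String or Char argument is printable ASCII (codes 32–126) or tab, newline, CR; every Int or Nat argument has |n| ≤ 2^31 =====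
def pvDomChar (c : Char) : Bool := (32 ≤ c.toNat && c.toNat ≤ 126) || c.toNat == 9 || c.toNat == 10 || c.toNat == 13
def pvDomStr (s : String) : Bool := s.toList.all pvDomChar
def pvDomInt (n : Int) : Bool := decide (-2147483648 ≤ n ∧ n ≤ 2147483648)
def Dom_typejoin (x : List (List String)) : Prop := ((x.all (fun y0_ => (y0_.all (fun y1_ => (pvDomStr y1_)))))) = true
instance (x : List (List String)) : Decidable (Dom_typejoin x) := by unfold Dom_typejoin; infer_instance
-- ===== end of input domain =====

set_option maxRecDepth 16000


-- B classifies each row by a binary search over the flattened (type,label) pairs sorted once by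
-- type string, instead of A's five linear membership scans per row (alternative algorithm).

-- the five literal category lists of the Python source (shared constants of both programs;
-- note 'TRAILER HGVPRIVATE HGV' reproduces the source's adjacent-string-concatenation quirk)
def carL : List String := ["NHSV", "NOT LICENSED", "DISABLED PASSENGER VEHICLE", "ELECTRIC", "PETROL CAR", "POLICE", "HACKNEY", "ALTERNATIVE FUEL CAR", "MOWING MACHINE", "DIESEL CAR", "DISABLED", "PERSONAL EXPORT PRIVATE", "STEAM", "EXEMPT (SEC 7(1) VE ACT)", "EXEMPT (NIL LICENCE)", "DIRECT EXPORT PRIVATE", "EXEMPT (NO LICENCE)", "SPECIAL VEHICLE", "HISTORIC VEHICLE", "SPECIAL TYPES VEHICLES", "ROAD CONSTRUCTION", "RECOVERY VEHICLE", "SMALL ISLANDS", "N/A", "LIMITED USE"]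
def mbL : List String := ["BICYCLE", "TRICYCLE", "ELECTRIC MOTORCYCLE"]
def lgvL : List String := ["AMBULANCE", "LIGHT GOODS VEHICLE LGV", "LIGHT GOODS FARMERS", "PRIVATE LIGHT GOODS (PLG)", "WORKS TRUCK", "GOODS ELECTRIC", "EURO 4 LGV"]
def hgvL : List String := ["TRAILER HGVPRIVATE HGV", "GRITTING MACHINE", "LIFEBOAT HAULAGE", "ROAD ROLLER", "SNOW PLOUGH", "HGV CT", "HGV", "GENERAL HAULAGE", "FIRE SERVICE", "AGRICULTURAL MACHINE", "DIGGING MACHINE", "FIRE ENGINE"]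
def busL : List String := ["BUS"]

-- ===== PORT A =====
-- five sequential membership tests per row, each appending to ret
def typejoin (x : List (List String)) : List (List String) :=
  x.foldl (fun ret n =>
    let n0 := (PySem.List.pyGet? n 0).getD ""
    let n1 := (PySem.List.pyGet? n 1).getD ""
    let n2 := (PySem.List.pyGet? n 2).getD ""
    let n3 := (PySem.List.pyGet? n 3).getD ""
    let ret := if n2 ∈ carL then ret ++ [[n0, n1, "Car", n3]] else ret
    let ret := if n2 ∈ mbL then ret ++ [[n0, n1, "Mbike", n3]] else ret
    let ret := if n2 ∈ lgvL then ret ++ [[n0, n1, "LGV", n3]] else ret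
    let ret := if n2 ∈ hgvL then ret ++ [[n0, n1, "HGV", n3]] else ret
    let ret := if n2 ∈ busL then ret ++ [[n0, n1, "Bus", n3]] else ret
    ret) []

-- ===== PORT B =====
-- Python string comparison is code-point lexicographic; it is ported on `.toList`
-- (`List Char` lex order), which is exact for it — Lean's own `String <` instance is
-- kernel-opaque, the char-list order is the same order and reduces.
-- Source B: flattened (type,label) pairs, sorted once by the type string (key=lambda p: p[0])
def pairsB : List (String × String) :=
  PySem.List.sorted
    (carL.map (fun t => (t, "Car")) ++ mbL.map (fun t => (t, "Mbike"))
      ++ lgvL.map (fun t => (t, "LGV")) ++ hgvL.map (fun t => (t, "HGV"))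
      ++ busL.map (fun t => (t, "Bus")))
    (fun p => p.1.toList)
-- Source B: keys = [p[0] for p in pairs]
def keysB : List (List Char) := pairsB.map (fun p => p.1.toList)
-- Source B's hand-written bisect_left while-loop IS Python's bisect.bisect_left (Source B may not
-- import bisect since A imports nothing), ported as the PySem primitive for it; then the
-- same guard 'lo < len(keys) and keys[lo] == t'
def lookupB (t : String) : Option String :=
  let tl := t.toList
  let lo := PySem.List.bisectLeft keysB tl
  if lo < keysB.length ∧ keysB.getD lo [] = tl then some (pairsB.getD lo ("", "")).2 else none
def typejoin_alt (x : List (List String)) : List (List String) :=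
  x.foldl (fun ret n =>
    match lookupB ((PySem.List.pyGet? n 2).getD "") with
    | some lab => ret ++ [[(PySem.List.pyGet? n 0).getD "", (PySem.List.pyGet? n 1).getD "", lab, (PySem.List.pyGet? n 3).getD ""]]
    | none => ret) []

-- ===== PRECONDITION & SPEC =====
def allTypesL : List String := carL ++ mbL ++ lgvL ++ hgvL ++ busL
-- Pre_ excludes exactly the inputs where the Python A raises IndexError: a row shorter
-- than 3, or a row of length 3 whose type string is categorised (then n[3] is read).
def Pre_typejoin (x : List (List String)) : Prop :=
  ∀ n ∈ x, 3 ≤ n.length ∧ (n.getD 2 "" ∈ allTypesL → 4 ≤ n.length)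
instance (x : List (List String)) : Decidable (Pre_typejoin x) := by unfold Pre_typejoin; infer_instance
def pvWitness_typejoin : List (List String) := [["a", "b", "BUS", "d"], ["p", "q", "unknown", "r"], ["u", "v", "HGV", "w", "z"]]
def Spec_typejoin (x : List (List String)) (out : List (List String)) : Prop := out = typejoin_alt x
instance (x : List (List String)) (out : List (List String)) : Decidable (Spec_typejoin x out) := by unfold Spec_typejoin; infer_instance

-- ===== CLAIM =====
def Claim_equal_typejoin : Prop := ∀ (x : List (List String)), Dom_typejoin x → Pre_typejoin x → Spec_typejoin x (typejoin x)

-- ===== LEMMAS AND PROOFS =====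

-- the sorted pair list, evaluated once so later proofs never re-run the sort
def pairsLit : List (String × String) := [("AGRICULTURAL MACHINE", "HGV"), ("ALTERNATIVE FUEL CAR", "Car"), ("AMBULANCE", "LGV"), ("BICYCLE", "Mbike"), ("BUS", "Bus"), ("DIESEL CAR", "Car"), ("DIGGING MACHINE", "HGV"), ("DIRECT EXPORT PRIVATE", "Car"), ("DISABLED", "Car"), ("DISABLED PASSENGER VEHICLE", "Car"), ("ELECTRIC", "Car"), ("ELECTRIC MOTORCYCLE", "Mbike"), ("EURO 4 LGV", "LGV"), ("EXEMPT (NIL LICENCE)", "Car"), ("EXEMPT (NO LICENCE)", "Car"), ("EXEMPT (SEC 7(1) VE ACT)", "Car"), ("FIRE ENGINE", "HGV"), ("FIRE SERVICE", "HGV"), ("GENERAL HAULAGE", "HGV"), ("GOODS ELECTRIC", "LGV"), ("GRITTING MACHINE", "HGV"), ("HACKNEY", "Car"), ("HGV", "HGV"), ("HGV CT", "HGV"), ("HISTORIC VEHICLE", "Car"), ("LIFEBOAT HAULAGE", "HGV"), ("LIGHT GOODS FARMERS", "LGV"), ("LIGHT GOODS VEHICLE LGV", "LGV"), ("LIMITED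 USE", "Car"), ("MOWING MACHINE", "Car"), ("N/A", "Car"), ("NHSV", "Car"), ("NOT LICENSED", "Car"), ("PERSONAL EXPORT PRIVATE", "Car"), ("PETROL CAR", "Car"), ("POLICE", "Car"), ("PRIVATE LIGHT GOODS (PLG)", "LGV"), ("RECOVERY VEHICLE", "Car"), ("ROAD CONSTRUCTION", "Car"), ("ROAD ROLLER", "HGV"), ("SMALL ISLANDS", "Car"), ("SNOW PLOUGH", "HGV"), ("SPECIAL TYPES VEHICLES", "Car"), ("SPECIAL VEHICLE", "Car"), ("STEAM", "Car"), ("TRAILER HGVPRIVATE HGV", "HGV"), ("TRICYCLE", "Mbike"), ("WORKS TRUCK", "LGV")]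

theorem pairsB_eq : pairsB = pairsLit := by decide

theorem keysB_eq : keysB = pairsLit.map (fun p => p.1.toList) := by
  rw [keysB, pairsB_eq]

-- the binary-search lookup agrees with A's five-way membership chain on every known type string
theorem lookupB_known : ∀ t ∈ allTypesL,
    lookupB t =
      (if t ∈ carL then some "Car" else if t ∈ mbL then some "Mbike"
       else if t ∈ lgvL then some "LGV" else if t ∈ hgvL then some "HGV"
       else if t ∈ busL then some "Bus" else none) := by
  simp only [lookupB, keysB_eq, pairsB_eq]
  decide

theorem fstPairs_sub : ∀ s ∈ pairsLit.map (fun p => p.1), s ∈ allTypesL := by decide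

theorem lookupB_eq (t : String) :
    lookupB t =
      (if t ∈ carL then some "Car" else if t ∈ mbL then some "Mbike"
       else if t ∈ lgvL then some "LGV" else if t ∈ hgvL then some "HGV"
       else if t ∈ busL then some "Bus" else none) := by
  by_cases hk : t ∈ allTypesL
  · exact lookupB_known t hk
  · have h1 : t ∉ carL := fun h => hk (by simp [allTypesL, h])
    have h2 : t ∉ mbL := fun h => hk (by simp [allTypesL, h])
    have h3 : t ∉ lgvL := fun h => hk (by simp [allTypesL, h])
    have h4 : t ∉ hgvL := fun h => hk (by simp [allTypesL, h])
    have h5 : t ∉ busL := fun h => hk (by simp [allTypesL, h])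
    simp only [h1, h2, h3, h4, h5, if_false]
    by_cases hg : PySem.List.bisectLeft keysB t.toList < keysB.length ∧
        keysB.getD (PySem.List.bisectLeft keysB t.toList) [] = t.toList
    · -- the guard found keys[lo] == t, so t is one of the known type strings: contradiction
      exfalso
      obtain ⟨hlo, heq⟩ := hg
      generalize PySem.List.bisectLeft keysB t.toList = lo at hlo heq
      rw [keysB_eq] at hlo heq
      rw [List.getD_eq_getElem _ _ hlo, List.getElem_map] at heq
      have hfst : (pairsLit[lo]'(by simpa using hlo)).1 = t := by
        have := congrArg String.ofList heq
        simpa using this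
      exact hk (fstPairs_sub t (hfst ▸ List.mem_map_of_mem (List.getElem_mem _)))
    · simp only [lookupB, if_neg hg]

theorem disj_car_mb : ∀ s ∈ carL, s ∉ mbL := by decide
theorem disj_car_lgv : ∀ s ∈ carL, s ∉ lgvL := by decide
theorem disj_car_hgv : ∀ s ∈ carL, s ∉ hgvL := by decide
theorem disj_car_bus : ∀ s ∈ carL, s ∉ busL := by decide
theorem disj_mb_lgv : ∀ s ∈ mbL, s ∉ lgvL := by decide
theorem disj_mb_hgv : ∀ s ∈ mbL, s ∉ hgvL := by decide
theorem disj_mb_bus : ∀ s ∈ mbL, s ∉ busL := by decide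
theorem disj_lgv_hgv : ∀ s ∈ lgvL, s ∉ hgvL := by decide
theorem disj_lgv_bus : ∀ s ∈ lgvL, s ∉ busL := by decide
theorem disj_hgv_bus : ∀ s ∈ hgvL, s ∉ busL := by decide

theorem step_eq (ret : List (List String)) (n : List String) :
    (let n0 := (PySem.List.pyGet? n 0).getD ""
     let n1 := (PySem.List.pyGet? n 1).getD ""
     let n2 := (PySem.List.pyGet? n 2).getD ""
     let n3 := (PySem.List.pyGet? n 3).getD ""
     let r1 := if n2 ∈ carL then ret ++ [[n0, n1, "Car", n3]] else ret
     let r2 := if n2 ∈ mbL then r1 ++ [[n0, n1, "Mbike", n3]] else r1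
     let r3 := if n2 ∈ lgvL then r2 ++ [[n0, n1, "LGV", n3]] else r2
     let r4 := if n2 ∈ hgvL then r3 ++ [[n0, n1, "HGV", n3]] else r3
     if n2 ∈ busL then r4 ++ [[n0, n1, "Bus", n3]] else r4)
    = (match lookupB ((PySem.List.pyGet? n 2).getD "") with
       | some lab => ret ++ [[(PySem.List.pyGet? n 0).getD "", (PySem.List.pyGet? n 1).getD "", lab, (PySem.List.pyGet? n 3).getD ""]]
       | none => ret) := by
  set t := (PySem.List.pyGet? n 2).getD "" with ht
  rw [lookupB_eq t]
  by_cases h1 : t ∈ carL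
  · simp [h1, disj_car_mb _ h1, disj_car_lgv _ h1, disj_car_hgv _ h1, disj_car_bus _ h1]
  by_cases h2 : t ∈ mbL
  · simp [h1, h2, disj_mb_lgv _ h2, disj_mb_hgv _ h2, disj_mb_bus _ h2]
  by_cases h3 : t ∈ lgvL
  · simp [h1, h2, h3, disj_lgv_hgv _ h3, disj_lgv_bus _ h3]
  by_cases h4 : t ∈ hgvL
  · simp [h1, h2, h3, h4, disj_hgv_bus _ h4]
  by_cases h5 : t ∈ busL
  · simp [h1, h2, h3, h4, h5]
  · simp [h1, h2, h3, h4, h5]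

-- ===== VERDICT =====
theorem typejoin_spec : Claim_equal_typejoin := by
  intro x _ _
  show typejoin x = typejoin_alt x
  unfold typejoin typejoin_alt
  congr 1
  funext ret n
  exact step_eq ret n
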